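-- pv_equiv track=rewrite | github.com/rosinaSav/RBP_motifs | conservation.py | fill_codons
-- ===== SOURCE A (Python) =====
-- def fill_codons(motif_positions, two_fold, four_fold):
--     '''
--     Given a list of  motif hit positions, transform it to give a list of full codons.
--     NB! This works either if you have blocks of contiguous bases (i.e. full motif hits) or fourfold degenerate positions, that is to say, there are never two adjacent positions.
--     Anything else and this function will produce nonsense.
--     '''
--     motif_positions = [int(i) for i in motif_positions]
--     positions_number = len(motif_positions)
--     to_add = []
--     to_delete = []
--     to_change_two_fold = []
--     to_change_four_fold = []
--     for i,j in enumerate(motif_positions):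
--         if i == 0 or (j-motif_positions[i-1]) != 1:#if it's the first motif hit base in the sequence or if it's the first one in a block (the previous motif hit base wasn't contiguous)
--             #if it's the second base of a codon
--             if j%3 == 1:
--                 #add the preceding base
--                 to_add.append(j-1)
--                 #if the base just added is a two-fold degenerate site in a Lecuine/Arginine codon, store the position
--                 if j-1 in two_fold:
--                     to_change_two_fold.append(j-1)
--                 #if it is a four-fold degenerate site in a Leu/Arg codon, store the position in another list
--                 elif j-1 in four_fold:
--                     to_change_four_fold.append(j-1)
--             #if it's the third base of a codon
--             elif j%3 == 2:
--                 #add the two preceding bases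
--                 to_add.extend([j-2,j-1])
--                 if j-2 in two_fold:
--                     to_change_two_fold.append(j-2)
--                 elif j-2 in four_fold:
--                     to_change_four_fold.append(j-2)
--         elif (i+1 == positions_number) or (motif_positions[i+1] - j != 1):#if it's the last motif hit base of the sequence or the last one of a contiguous block
--             #if it's the first base of a codon
--             if j%3 == 0:
--                 #remove that base
--                 to_delete.append(j)
--             #if it's the second base of a codon
--             elif j%3 == 1:
--                 #remove both that and the preceding base
--                 to_delete.extend([j-1,j])
--     #first delete superfluous bases, then add new ones or you might delete some of the bases you just added if two motif hit blocks are only separated by a base or two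
--     motif_positions = [i for i in motif_positions if i not in to_delete]
--     motif_positions.extend(to_add)
--     motif_positions = sorted(motif_positions)
--     return(motif_positions, to_change_two_fold, to_change_four_fold)
-- ===== SOURCE B (Python) =====
-- def fill_codons(motif_positions, two_fold, four_fold):
--     vals = [int(i) for i in motif_positions]
--     n = len(vals)
--     to_add = []
--     to_delete = []
--     to_change_two_fold = []
--     to_change_four_fold = []
--     k = 0
--     while k < n:
--         # extract the maximal contiguous run starting here (input-order adjacency)
--         s = vals[k]
--         e = s
--         k += 1
--         run_len = 1
--         while k < n and vals[k] - e == 1: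
--             e = vals[k]
--             k += 1
--             run_len += 1
--         # complete the codon at the front of the run: add every base from the
--         # codon start up to (excluding) s
--         head = s - s % 3
--         to_add.extend(range(head, s))
--         if head < s:
--             if head in two_fold:
--                 to_change_two_fold.append(head)
--             elif head in four_fold:
--                 to_change_four_fold.append(head)
--         # trim the incomplete codon at the back of a multi-base run
--         if run_len >= 2 and e % 3 != 2:
--             to_delete.extend(range(e - e % 3, e + 1))
--     result = sorted([v for v in vals if v not in to_delete] + to_add)
--     return (result, to_change_two_fold, to_change_four_fold)
-- ===== Notes on version B (the rewrite author's own statement) =====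
-- stated objective: alternative
-- what changed: Instead of A's per-element enumerate loop that tests each index against its neighbours, B extracts maximal contiguous runs with a pointer-advancing while loop and emits each run's front-fill and back-trim as arithmetic ranges (range(s - s%3, s) / range(e - e%3, e+1)) in one per-run step.
import Mathlib
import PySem

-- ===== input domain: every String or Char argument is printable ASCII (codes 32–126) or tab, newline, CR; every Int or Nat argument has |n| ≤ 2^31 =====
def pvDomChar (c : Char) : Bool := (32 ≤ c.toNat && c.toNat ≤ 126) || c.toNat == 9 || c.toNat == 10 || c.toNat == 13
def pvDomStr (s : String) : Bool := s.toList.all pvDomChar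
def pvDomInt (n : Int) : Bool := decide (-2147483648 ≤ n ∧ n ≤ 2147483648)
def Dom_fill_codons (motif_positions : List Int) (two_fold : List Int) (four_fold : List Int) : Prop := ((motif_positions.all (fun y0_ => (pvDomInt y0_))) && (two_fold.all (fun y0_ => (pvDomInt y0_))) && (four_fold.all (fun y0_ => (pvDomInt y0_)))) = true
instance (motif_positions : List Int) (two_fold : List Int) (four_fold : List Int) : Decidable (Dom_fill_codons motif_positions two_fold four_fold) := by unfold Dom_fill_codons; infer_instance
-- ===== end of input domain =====

-- B replaces A's per-element enumerate loop (index lookback/lookahead tests) by a pointer-advancing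
-- run-extraction loop that emits each run's front-fill and back-trim as arithmetic ranges; same value.


-- ===== PORT A =====
-- loop body of A's 'for i,j in enumerate(motif_positions)'; state = (to_add, to_delete, to_change_two_fold, to_change_four_fold).
-- 'motif_positions[i-1]' / 'motif_positions[i+1]' are plain indexing, only reached with the index in range
-- (guarded by the preceding 'i == 0' / 'i+1 == positions_number' disjunct), so pyGetD with a dummy default is exact.
def fcStepA (vals : List Int) (n : Int) (two_fold : List Int) (four_fold : List Int)
    (s : List Int × List Int × List Int × List Int) (ij : Int × Int) :
    List Int × List Int × List Int × List Int :=
  let i := ij.1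
  let j := ij.2
  let ta := s.1
  let td := s.2.1
  let t2 := s.2.2.1
  let t4 := s.2.2.2
  if i = 0 ∨ j - (PySem.List.pyGetD vals (i - 1) 0) ≠ 1 then
    if j % 3 = 1 then
      if (j - 1) ∈ two_fold then (ta ++ [j - 1], td, t2 ++ [j - 1], t4)
      else if (j - 1) ∈ four_fold then (ta ++ [j - 1], td, t2, t4 ++ [j - 1])
      else (ta ++ [j - 1], td, t2, t4)
    else if j % 3 = 2 then
      if (j - 2) ∈ two_fold then (ta ++ [j - 2, j - 1], td, t2 ++ [j - 2], t4)
      else if (j - 2) ∈ four_fold then (ta ++ [j - 2, j - 1], td, t2, t4 ++ [j - 2])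
      else (ta ++ [j - 2, j - 1], td, t2, t4)
    else (ta, td, t2, t4)
  else if i + 1 = n ∨ (PySem.List.pyGetD vals (i + 1) 0) - j ≠ 1 then
    if j % 3 = 0 then (ta, td ++ [j], t2, t4)
    else if j % 3 = 1 then (ta, td ++ [j - 1, j], t2, t4)
    else (ta, td, t2, t4)
  else (ta, td, t2, t4)

def fill_codons (motif_positions : List Int) (two_fold : List Int) (four_fold : List Int) : List Int × List Int × List Int :=
  let vals := motif_positions.map (fun x => x)   -- [int(i) for i in motif_positions]: int() is the identity on ints
  let n : Int := (vals.length : Int)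
  let s := (PySem.List.enumerate vals 0).foldl (fcStepA vals n two_fold four_fold) ([], [], [], [])
  let kept := vals.filter (fun v => decide (v ∉ s.2.1))
  (PySem.List.sorted (kept ++ s.1) (fun x => x) false, s.2.2.1, s.2.2.2)

-- ===== PORT B =====
-- the inner 'while k < n and vals[k] - e == 1' of Source B: starting after value e, consume the rest of the
-- contiguous run; returns (last value of the run, number of extra elements consumed, remaining list)
def fcRun : Int → List Int → Int × Nat × List Int
  | e, [] => (e, 0, [])
  | e, v :: rest =>
    if v - e = 1 then
      let t := fcRun v rest
      (t.1, t.2.1 + 1, t.2.2)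
    else (e, 0, v :: rest)

theorem fcRun_len (e : Int) (l : List Int) : (fcRun e l).2.2.length ≤ l.length := by
  induction l generalizing e with
  | nil => simp [fcRun]
  | cons v rest ih =>
    simp only [fcRun]
    split
    · exact le_trans (ih v) (Nat.le_succ _)
    · simp

-- the outer 'while k < n' of Source B; acc = (to_add, to_delete, to_change_two_fold, to_change_four_fold)
def fcLoopB (two_fold four_fold : List Int) :
    List Int → List Int × List Int × List Int × List Int → List Int × List Int × List Int × List Int
  | [], acc => acc
  | s :: rest, acc =>
    let t := fcRun s rest
    let head := s - s % 3
    let adds := PySem.List.pyRange head s 1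
    let c2 : List Int := if head < s ∧ head ∈ two_fold then [head] else []
    let c4 : List Int := if head < s ∧ head ∉ two_fold ∧ head ∈ four_fold then [head] else []
    let dels : List Int :=
      if 1 ≤ t.2.1 ∧ t.1 % 3 ≠ 2 then PySem.List.pyRange (t.1 - t.1 % 3) (t.1 + 1) 1 else []
    fcLoopB two_fold four_fold t.2.2 (acc.1 ++ adds, acc.2.1 ++ dels, acc.2.2.1 ++ c2, acc.2.2.2 ++ c4)
  termination_by l _ => l.length
  decreasing_by
    have := fcRun_len s rest
    simp only [List.length_cons]
    omega

def fill_codons_alt (motif_positions : List Int) (two_fold : List Int) (four_fold : List Int) : List Int × List Int × List Int :=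
  let vals := motif_positions.map (fun x => x)
  let s := fcLoopB two_fold four_fold vals ([], [], [], [])
  let kept := vals.filter (fun v => decide (v ∉ s.2.1))
  (PySem.List.sorted (kept ++ s.1) (fun x => x) false, s.2.2.1, s.2.2.2)

-- ===== PRECONDITION & SPEC =====
def Spec_fill_codons (motif_positions : List Int) (two_fold : List Int) (four_fold : List Int) (out : List Int × List Int × List Int) : Prop := out = fill_codons_alt motif_positions two_fold four_fold
instance (motif_positions : List Int) (two_fold : List Int) (four_fold : List Int) (out : List Int × List Int × List Int) : Decidable (Spec_fill_codons motif_positions two_fold four_fold out) := by unfold Spec_fill_codons; infer_instance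

-- ===== CLAIM (what is proved, stated in full; the proofs are below) =====
def Claim_equal_fill_codons : Prop := ∀ (motif_positions : List Int) (two_fold : List Int) (four_fold : List Int), Dom_fill_codons motif_positions two_fold four_fold → Spec_fill_codons motif_positions two_fold four_fold (fill_codons motif_positions two_fold four_fold)

-- ===== LEMMAS AND PROOFS =====

-- 'is this position a block start, given the previous value (none at the head of the sequence)?'
def fcStartB (p : Option Int) (j : Int) : Bool :=
  match p with
  | none => true
  | some p => decide (j - p ≠ 1)

-- 'no successor continues the block'
def fcEndB (nx : Option Int) (j : Int) : Bool :=
  match nx with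
  | none => true
  | some nx => decide (nx - j ≠ 1)

-- A's per-start additions / per-end deletions, as case tables
def fcAddOf (j : Int) : List Int :=
  if j % 3 = 1 then [j - 1] else if j % 3 = 2 then [j - 2, j - 1] else []

def fcDelOf (j : Int) : List Int :=
  if j % 3 = 0 then [j] else if j % 3 = 1 then [j - 1, j] else []

-- block starts of l given the value preceding l
def fcStartsP (p : Option Int) : List Int → List Int
  | [] => []
  | j :: rest => (if fcStartB p j then [j] else []) ++ fcStartsP (some j) rest

-- block ends (of blocks of length ≥ 2) of l given the preceding value
def fcEndsP (p : Option Int) : List Int → List Int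
  | [] => []
  | j :: rest => (if !fcStartB p j && fcEndB rest.head? j then [j] else []) ++ fcEndsP (some j) rest

def fcHeads (two_fold four_fold : List Int) (starts : List Int) : List Int × List Int :=
  let heads := (starts.filter (fun j => j % 3 == 1 || j % 3 == 2)).map
      (fun j => if j % 3 = 1 then j - 1 else j - 2)
  (heads.filter (fun h => decide (h ∈ two_fold)),
   heads.filter (fun h => decide (h ∉ two_fold) && decide (h ∈ four_fold)))

-- one step of A's loop, rewritten through the neighbour predicates
theorem fcStepA_eq (pre rest : List Int) (j : Int) (two_fold four_fold : List Int)
    (s : List Int × List Int × List Int × List Int) :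
    fcStepA (pre ++ j :: rest) ((pre ++ j :: rest).length : Int) two_fold four_fold s ((pre.length : Int), j)
      = if fcStartB pre.getLast? j then
          (s.1 ++ fcAddOf j, s.2.1, s.2.2.1 ++ (fcHeads two_fold four_fold [j]).1,
           s.2.2.2 ++ (fcHeads two_fold four_fold [j]).2)
        else if fcEndB rest.head? j then
          (s.1, s.2.1 ++ fcDelOf j, s.2.2.1, s.2.2.2)
        else s := by
  have hstart : ((pre.length : Int) = 0 ∨ j - (PySem.List.pyGetD (pre ++ j :: rest) ((pre.length : Int) - 1) 0) ≠ 1)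
      ↔ fcStartB pre.getLast? j = true := by
    cases pre with
    | nil => simp [fcStartB]
    | cons q qs =>
      have hlen : ((q :: qs).length : Int) - 1 = (((q :: qs).length - 1 : Nat) : Int) := by
        simp
      have hidx : (((q :: qs) ++ j :: rest).getD ((q :: qs).length - 1) 0) = ((q :: qs).getLast?).getD 0 := by
        rw [List.getD_eq_getElem?_getD, List.getElem?_append_left (by simp), ← List.getLast?_eq_getElem?]
      have hlast : (q :: qs).getLast? = some ((q :: qs).getLast (by simp)) := by
        simp [List.getLast?_eq_getLast]
      rw [hlen, PySem.List.pyGetD_natCast, hidx, hlast]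
      simp only [Option.getD_some, fcStartB, decide_eq_true_eq, List.length_cons]
      constructor
      · rintro (h | h)
        · exfalso
          omega
        · exact h
      · exact Or.inr
  have hend : ((pre.length : Int) + 1 = ((pre ++ j :: rest).length : Int) ∨
      (PySem.List.pyGetD (pre ++ j :: rest) ((pre.length : Int) + 1) 0) - j ≠ 1)
      ↔ fcEndB rest.head? j = true := by
    cases rest with
    | nil => simp [fcEndB]
    | cons r rs =>
      have hlen : ((pre.length : Int) + 1) = ((pre.length + 1 : Nat) : Int) := by
        push_cast
        ring
      rw [hlen, PySem.List.pyGetD_natCast]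
      have hidx : ((pre ++ j :: r :: rs).getD (pre.length + 1) 0) = r := by
        rw [List.getD_eq_getElem?_getD, List.getElem?_append_right (by omega)]
        simp
      rw [hidx]
      simp only [fcEndB, List.head?_cons, List.length_append, List.length_cons, decide_eq_true_eq]
      constructor
      · intro h
        rcases h with h | h
        · omega
        · exact h
      · intro h
        exact Or.inr h
  by_cases h1 : fcStartB pre.getLast? j
  · have hc : ((pre.length : Int) = 0 ∨ j - (PySem.List.pyGetD (pre ++ j :: rest) ((pre.length : Int) - 1) 0) ≠ 1) :=
      hstart.mpr h1
    simp only [fcStepA, if_pos hc, h1, if_pos rfl]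
    by_cases hm1 : j % 3 = 1
    · by_cases h2 : (j - 1) ∈ two_fold
      · simp [fcHeads, fcAddOf, hm1, h2, List.filter_cons]
      · by_cases h4 : (j - 1) ∈ four_fold <;>
          simp [fcHeads, fcAddOf, hm1, h2, h4, List.filter_cons]
    · by_cases hm2 : j % 3 = 2
      · by_cases h2 : (j - 2) ∈ two_fold
        · simp [fcHeads, fcAddOf, hm1, hm2, h2, List.filter_cons]
        · by_cases h4 : (j - 2) ∈ four_fold <;>
            simp [fcHeads, fcAddOf, hm1, hm2, h2, h4, List.filter_cons]
      · simp [fcHeads, fcAddOf, hm1, hm2]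
  · have hns : ¬ ((pre.length : Int) = 0 ∨ j - (PySem.List.pyGetD (pre ++ j :: rest) ((pre.length : Int) - 1) 0) ≠ 1) := by
      intro hc
      exact h1 (hstart.mp hc)
    have h1' : fcStartB pre.getLast? j = false := by
      cases hb : fcStartB pre.getLast? j
      · rfl
      · exact absurd hb h1
    simp only [fcStepA]
    rw [if_neg hns, h1']
    by_cases he : fcEndB rest.head? j
    · have hc : ((pre.length : Int) + 1 = ((pre ++ j :: rest).length : Int) ∨
          (PySem.List.pyGetD (pre ++ j :: rest) ((pre.length : Int) + 1) 0) - j ≠ 1) := hend.mpr he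
      rw [if_pos hc, he]
      simp only [fcDelOf]
      split_ifs <;> simp_all
    · have hne : ¬ ((pre.length : Int) + 1 = ((pre ++ j :: rest).length : Int) ∨
          (PySem.List.pyGetD (pre ++ j :: rest) ((pre.length : Int) + 1) 0) - j ≠ 1) := by
        intro hc
        exact he (hend.mp hc)
      have he' : fcEndB rest.head? j = false := by
        cases hb : fcEndB rest.head? j
        · rfl
        · exact absurd hb he
      rw [if_neg hne, he']
      simp

theorem fcLoopA (two_fold four_fold : List Int) :
    ∀ (suf pre : List Int) (ta td t2 t4 : List Int),
    (PySem.List.enumerate suf (pre.length : Int)).foldl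
        (fcStepA (pre ++ suf) ((pre ++ suf).length : Int) two_fold four_fold) (ta, td, t2, t4)
      = (ta ++ (fcStartsP pre.getLast? suf).flatMap fcAddOf,
         td ++ (fcEndsP pre.getLast? suf).flatMap fcDelOf,
         t2 ++ (fcHeads two_fold four_fold (fcStartsP pre.getLast? suf)).1,
         t4 ++ (fcHeads two_fold four_fold (fcStartsP pre.getLast? suf)).2) := by
  intro suf
  induction suf with
  | nil => intro pre ta td t2 t4; simp [PySem.List.enumerate_nil, fcStartsP, fcEndsP, fcHeads]
  | cons j rest ih =>
    intro pre ta td t2 t4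
    rw [PySem.List.enumerate_cons, List.foldl_cons, fcStepA_eq pre rest j two_fold four_fold]
    have hlen : (pre.length : Int) + 1 = (((pre ++ [j]).length : Nat) : Int) := by push_cast; simp
    have happ : pre ++ j :: rest = (pre ++ [j]) ++ rest := by simp
    have hlast : (pre ++ [j]).getLast? = some j := by simp
    by_cases h1 : fcStartB pre.getLast? j
    · simp only [if_pos h1]
      rw [hlen, happ, ih (pre ++ [j])]
      simp [hlast, fcStartsP, fcEndsP, fcHeads, h1, List.append_assoc]
      constructor <;>
        rw [show (j :: fcStartsP (some j) rest) = [j] ++ fcStartsP (some j) rest from rfl,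
          List.filter_append, List.map_append, List.filter_append]
    · simp only [if_neg h1]
      have h1' : fcStartB pre.getLast? j = false := by
        cases hb : fcStartB pre.getLast? j
        · rfl
        · exact absurd hb h1
      by_cases he : fcEndB rest.head? j
      · simp only [if_pos he]
        rw [hlen, happ, ih (pre ++ [j])]
        simp [hlast, fcStartsP, fcEndsP, fcHeads, h1', he, List.append_assoc]
      · have he' : fcEndB rest.head? j = false := by
          cases hb : fcEndB rest.head? j
          · rfl
          · exact absurd hb he
        simp only [if_neg he]
        rw [hlen, happ, ih (pre ++ [j])]
        simp [hlast, fcStartsP, fcEndsP, h1', he']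

-- B-side: how fcRun relates to the start/end characterisations
theorem fcRun_spec (rest : List Int) : ∀ (s : Int),
    fcStartsP (some s) rest = fcStartsP (some (fcRun s rest).1) (fcRun s rest).2.2
    ∧ fcEndsP (some s) rest
        = (if 1 ≤ (fcRun s rest).2.1 then [(fcRun s rest).1] else [])
            ++ fcEndsP (some (fcRun s rest).1) (fcRun s rest).2.2
    ∧ (∀ v r', (fcRun s rest).2.2 = v :: r' → v - (fcRun s rest).1 ≠ 1) := by
  induction rest with
  | nil =>
    intro s
    refine ⟨rfl, by simp [fcRun, fcEndsP], ?_⟩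
    intro v r' h
    simp [fcRun] at h
  | cons v r ih =>
    intro s
    by_cases hv : v - s = 1
    · obtain ⟨ihs, ihe, ihh⟩ := ih v
      have hrun : fcRun s (v :: r) = ((fcRun v r).1, (fcRun v r).2.1 + 1, (fcRun v r).2.2) := by
        simp [fcRun, hv]
      have hstart : fcStartB (some s) v = false := by simp [fcStartB, hv]
      rw [hrun]
      refine ⟨?_, ?_, ?_⟩
      · simp only [fcStartsP, hstart]
        simpa using ihs
      · simp only [fcEndsP, hstart, Bool.not_false, Bool.true_and]
        cases r with
        | nil => simp [fcRun, fcEndB, fcEndsP]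
        | cons w r' =>
          by_cases hw : w - v = 1
          · have hend : fcEndB (w :: r').head? v = false := by simp [fcEndB, hw]
            have hc : 1 ≤ (fcRun v (w :: r')).2.1 := by simp [fcRun, hw]
            rw [if_pos hc] at ihe
            rw [if_pos (by omega : 1 ≤ (fcRun v (w :: r')).2.1 + 1)]
            simp only [hend]
            simpa using ihe
          · have hrun2 : fcRun v (w :: r') = (v, 0, w :: r') := by simp [fcRun, hw]
            have hend : fcEndB (some w) v = true := by simp [fcEndB, hw]
            rw [hrun2]
            simp [hend, fcEndsP]
      · simpa using ihh
    · have hrun : fcRun s (v :: r) = (s, 0, v :: r) := by simp [fcRun, hv]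
      rw [hrun]
      refine ⟨rfl, by simp, ?_⟩
      intro x r' h
      simp only at h
      cases h
      exact hv

-- the per-run emissions of B coincide with A's case tables
theorem fcAdds_eq (s : Int) : PySem.List.pyRange (s - s % 3) s 1 = fcAddOf s := by
  have h0 : 0 ≤ s % 3 := Int.emod_nonneg s (by norm_num)
  have h3 : s % 3 < 3 := Int.emod_lt_of_pos s (by norm_num)
  have hcases : s % 3 = 0 ∨ s % 3 = 1 ∨ s % 3 = 2 := by omega
  unfold fcAddOf
  rcases hcases with h | h | h
  · rw [h]
    simp [PySem.List.pyRange_one_eq_nil (by omega : s ≤ s - 0), h]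
  · rw [h]
    rw [PySem.List.pyRange_one_cons (by omega : s - 1 < s)]
    rw [PySem.List.pyRange_one_eq_nil (by omega : s ≤ s - 1 + 1)]
    simp [h]
  · rw [h]
    rw [PySem.List.pyRange_one_cons (by omega : s - 2 < s)]
    rw [PySem.List.pyRange_one_cons (by omega : s - 2 + 1 < s)]
    rw [PySem.List.pyRange_one_eq_nil (by omega : s ≤ s - 2 + 1 + 1)]
    simp [h, show s - 2 + 1 = s - 1 by ring]

theorem fcDels_eq (e : Int) (c : Nat) :
    (if 1 ≤ c ∧ e % 3 ≠ 2 then PySem.List.pyRange (e - e % 3) (e + 1) 1 else [])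
      = (if 1 ≤ c then [e] else []).flatMap fcDelOf := by
  by_cases hc : 1 ≤ c
  · have h0 : 0 ≤ e % 3 := Int.emod_nonneg e (by norm_num)
    have h3 : e % 3 < 3 := Int.emod_lt_of_pos e (by norm_num)
    have hcases : e % 3 = 0 ∨ e % 3 = 1 ∨ e % 3 = 2 := by omega
    simp only [if_pos hc, List.flatMap_cons, List.flatMap_nil, List.append_nil]
    unfold fcDelOf
    rcases hcases with h | h | h
    · rw [h, if_pos ⟨hc, by norm_num⟩]
      rw [PySem.List.pyRange_one_cons (by omega : e - 0 < e + 1)]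
      rw [PySem.List.pyRange_one_eq_nil (by omega : e + 1 ≤ e - 0 + 1)]
      simp [h]
    · rw [h, if_pos ⟨hc, by norm_num⟩]
      rw [PySem.List.pyRange_one_cons (by omega : e - 1 < e + 1)]
      rw [PySem.List.pyRange_one_cons (by omega : e - 1 + 1 < e + 1)]
      rw [PySem.List.pyRange_one_eq_nil (by omega : e + 1 ≤ e - 1 + 1 + 1)]
      simp [h, show e - 1 + 1 = e by ring]
    · rw [h]
      simp
  · simp [hc]

theorem fcHeads_cons (two_fold four_fold : List Int) (s : Int) (S : List Int) :
    fcHeads two_fold four_fold (s :: S)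
      = ((if s - s % 3 < s ∧ (s - s % 3) ∈ two_fold then [s - s % 3] else [])
           ++ (fcHeads two_fold four_fold S).1,
         (if s - s % 3 < s ∧ (s - s % 3) ∉ two_fold ∧ (s - s % 3) ∈ four_fold then [s - s % 3] else [])
           ++ (fcHeads two_fold four_fold S).2) := by
  have h0 : 0 ≤ s % 3 := Int.emod_nonneg s (by norm_num)
  have h3 : s % 3 < 3 := Int.emod_lt_of_pos s (by norm_num)
  have hcases : s % 3 = 0 ∨ s % 3 = 1 ∨ s % 3 = 2 := by omega
  unfold fcHeads
  rcases hcases with h | h | h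
  · simp [List.filter_cons, h, sub_zero]
  · by_cases h2 : (s - 1) ∈ two_fold
    · simp [List.filter_cons, h, h2, show s - 1 < s by omega]
    · by_cases h4 : (s - 1) ∈ four_fold <;>
        simp [List.filter_cons, h, h2, h4, show s - 1 < s by omega]
  · by_cases h2 : (s - 2) ∈ two_fold
    · simp [List.filter_cons, h, h2, show s - 2 < s by omega]
    · by_cases h4 : (s - 2) ∈ four_fold <;>
        simp [List.filter_cons, h, h2, h4, show s - 2 < s by omega]

-- B's loop computes exactly A's characterisation, for any list whose head is a block start
theorem fcLoopB_spec (two_fold four_fold : List Int) :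
    ∀ (n : Nat) (l : List Int), l.length ≤ n →
    ∀ (p : Option Int) (acc : List Int × List Int × List Int × List Int),
    (∀ v r', l = v :: r' → fcStartB p v = true) →
    fcLoopB two_fold four_fold l acc
      = (acc.1 ++ (fcStartsP p l).flatMap fcAddOf,
         acc.2.1 ++ (fcEndsP p l).flatMap fcDelOf,
         acc.2.2.1 ++ (fcHeads two_fold four_fold (fcStartsP p l)).1,
         acc.2.2.2 ++ (fcHeads two_fold four_fold (fcStartsP p l)).2) := by
  intro n
  induction n with
  | zero =>
    intro l hl p acc _
    have : l = [] := List.eq_nil_of_length_eq_zero (Nat.le_zero.mp hl)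
    subst this
    simp [fcLoopB, fcStartsP, fcEndsP, fcHeads]
  | succ n ih =>
    intro l hl p acc hstart
    cases l with
    | nil => simp [fcLoopB, fcStartsP, fcEndsP, fcHeads]
    | cons s rest =>
      have hs : fcStartB p s = true := hstart s rest rfl
      obtain ⟨hS, hE, hH⟩ := fcRun_spec rest s
      have hlen : (fcRun s rest).2.2.length ≤ n := by
        have := fcRun_len s rest
        simp only [List.length_cons] at hl
        omega
      rw [fcLoopB]
      rw [ih (fcRun s rest).2.2 hlen (some (fcRun s rest).1) _
        (by
          intro v r' h
          simp only [fcStartB, decide_eq_true_eq]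
          exact hH v r' h)]
      have hSl : fcStartsP p (s :: rest)
          = s :: fcStartsP (some (fcRun s rest).1) (fcRun s rest).2.2 := by
        simp only [fcStartsP, hs, if_pos, ← hS]
        rfl
      have hEl : fcEndsP p (s :: rest)
          = (if 1 ≤ (fcRun s rest).2.1 then [(fcRun s rest).1] else [])
              ++ fcEndsP (some (fcRun s rest).1) (fcRun s rest).2.2 := by
        simp only [fcEndsP, hs, Bool.not_true, Bool.false_and, if_neg (by simp : ¬(false = true)),
          List.nil_append, hE]
      rw [hSl, hEl]
      rw [List.flatMap_cons, List.flatMap_append, fcHeads_cons]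
      simp only [fcAdds_eq, fcDels_eq]
      simp [List.append_assoc]

-- ===== VERDICT (by name: the statement is the Claim_ definition above) =====
theorem fill_codons_spec : Claim_equal_fill_codons := by
  intro motif_positions two_fold four_fold _
  unfold Spec_fill_codons
  simp only [fill_codons, fill_codons_alt]
  have hloop := fcLoopA two_fold four_fold (motif_positions.map (fun x => x)) [] [] [] [] []
  simp only [List.nil_append, List.length_nil, Nat.cast_zero, List.getLast?_nil] at hloop
  rw [hloop]
  rw [fcLoopB_spec two_fold four_fold (motif_positions.map (fun x => x)).length _ le_rfl none
    ([], [], [], []) (fun v r' _ => rfl)]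
  simp
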